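-- pv_equiv track=rewrite | github.com/dennishansen/iga | tools/dream.py | _parse
-- ===== SOURCE A (Python) =====
-- VALID_ACTIONS = ['THINK', 'SEARCH_SELF', 'READ_FILE', 'RUN_COMMAND', 'WAKE']
--
-- def _parse(response):
--     """Parse response to extract actions and their content"""
--     lines = response.strip().split('\n')
--     indices = []
--
--     # Find all action declarations
--     for i, line in enumerate(lines):
--         stripped = line.strip()
--         for act in VALID_ACTIONS:
--             # Match "ACTION" on its own line OR "ACTION: content" at start
--             if stripped == act or stripped.startswith(act + ':'):
--                 # If "ACTION: content", extract the inline content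
--                 inline_content = stripped[len(act):].lstrip(':').strip() if ':' in stripped else ''
--                 indices.append((i, act, inline_content))
--                 break
--
--     # If no actions found, treat entire response as THINK
--     if not indices:
--         return [("THINK", response)]
--
--     # Extract content for each action
--     actions = []
--     for idx, (line_idx, action, inline) in enumerate(indices):
--         # Content starts after the action line
--         start = line_idx + 1
--         # Content ends at next action or end of response
--         end = indices[idx + 1][0] if idx + 1 < len(indices) else len(lines)
--
--         # Get multi-line content
--         multiline = '\n'.join(lines[start:end]).strip()
--
--         # Combine inline and multiline content
--         if inline and multiline:
--             content = inline + '\n' + multiline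
--         elif inline:
--             content = inline
--         else:
--             content = multiline
--
--         actions.append((action, content))
--
--     return actions
-- ===== SOURCE B (Python) =====
-- VALID_ACTIONS = ['THINK', 'SEARCH_SELF', 'READ_FILE', 'RUN_COMMAND', 'WAKE']
--
--
-- def _match(stripped):
--     """Return (action, inline_content) if the stripped line declares an action, else None."""
--     for act in VALID_ACTIONS:
--         if stripped == act or stripped.startswith(act + ':'):
--             inline = stripped[len(act):].lstrip(':').strip() if ':' in stripped else ''
--             return (act, inline)
--     return None
--
--
-- def _finish(action, inline, buf):
--     """Combine an action's inline content with its buffered multi-line content."""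
--     multiline = '\n'.join(buf).strip()
--     if inline and multiline:
--         return (action, inline + '\n' + multiline)
--     elif inline:
--         return (action, inline)
--     else:
--         return (action, multiline)
--
--
-- def _parse(response):
--     # Single pass: keep the currently open action and a buffer of its raw lines.
--     result = []
--     current = None  # (action, inline_content) of the open action, or None
--     buf = []
--     for line in response.strip().split('\n'):
--         m = _match(line.strip())
--         if m is not None:
--             if current is not None:
--                 result.append(_finish(current[0], current[1], buf))
--             current = m
--             buf = []
--         elif current is not None:
--             buf.append(line)
--     if current is None:
--         return [('THINK', response)]
--     result.append(_finish(current[0], current[1], buf))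
--     return result
-- ===== Notes on version B (the rewrite author's own statement) =====
-- stated objective: alternative
-- what changed: A first collects all action-line indices and then re-slices the full line list per consecutive index pair; B is a single pass over the lines that keeps the currently open action with a buffer of its raw content lines and flushes it when the next action (or the end) is reached.
import Mathlib
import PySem

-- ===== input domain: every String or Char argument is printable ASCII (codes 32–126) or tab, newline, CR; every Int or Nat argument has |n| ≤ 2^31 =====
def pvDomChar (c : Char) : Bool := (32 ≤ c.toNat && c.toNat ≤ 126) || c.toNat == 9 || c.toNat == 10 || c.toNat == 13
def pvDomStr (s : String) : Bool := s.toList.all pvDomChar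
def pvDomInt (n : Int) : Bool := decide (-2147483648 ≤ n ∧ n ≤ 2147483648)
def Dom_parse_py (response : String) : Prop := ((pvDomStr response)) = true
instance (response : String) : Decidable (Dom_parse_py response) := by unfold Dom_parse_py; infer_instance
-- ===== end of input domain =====

-- B replaces A's two passes (collect all action indices, then re-slice the line list per
-- consecutive index pair) by a single pass that keeps the open action and a buffer of its
-- raw lines (objective: alternative decomposition, same cost).

-- Shared context: the module constant and the per-line match test, identical in both Pythons
-- (A has it inline in its first loop, B in its helper _match).
def VALID_ACTIONS : List (List Char) :=
  ["THINK".toList, "SEARCH_SELF".toList, "READ_FILE".toList, "RUN_COMMAND".toList, "WAKE".toList]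

-- 'for act in VALID_ACTIONS: if stripped == act or stripped.startswith(act+':'): … break'
-- stripped[len(act):] is List.drop (index nonneg, exact); .lstrip(':') is dropWhile (· == ':'),
-- exact by hand since every leading ':' is removed.
def matchAct : List (List Char) → List Char → Option (List Char × List Char)
  | [], _ => none
  | act :: acts, stripped =>
    if stripped == act || PySem.Chars.startswith stripped (act ++ [':']) then
      some (act,
        if PySem.Chars.isIn [':'] stripped then
          PySem.Chars.strip ((stripped.drop act.length).dropWhile (· == ':'))
        else [])
    else matchAct acts stripped

-- combine inline and multiline content (same three-branch if in both Pythons)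
def combineC (inl ml : List Char) : List Char :=
  if inl ≠ [] ∧ ml ≠ [] then inl ++ '\n' :: ml
  else if inl ≠ [] then inl
  else ml

-- ===== PORT A =====
-- first loop: 'for i, line in enumerate(lines): … indices.append((i, act, inline))'
def idxA (i : Int) : List (List Char) → List (Int × List Char × List Char)
  | [] => []
  | l :: rest =>
    match matchAct VALID_ACTIONS (PySem.Chars.strip l) with
    | some (a, inl) => (i, a, inl) :: idxA (i + 1) rest
    | none => idxA (i + 1) rest

-- second loop: 'for idx, (line_idx, action, inline) in enumerate(indices): …'
def segA (lines : List (List Char)) : List (Int × List Char × List Char) → List (List Char × List Char)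
  | [] => []
  | (i, a, inl) :: rest =>
    let e : Int := match rest with
      | [] => (lines.length : Int)
      | (j, _, _) :: _ => j
    let ml := PySem.Chars.strip (PySem.Chars.join ['\n'] (PySem.List.slice lines (some (i + 1)) (some e)))
    (a, combineC inl ml) :: segA lines rest

def parse_py (response : String) : List (String × String) :=
  let lines := PySem.Chars.splitOn (PySem.Chars.strip response.toList) ['\n']
  let idcs := idxA 0 lines
  if idcs = [] then [("THINK", response)]
  else (segA lines idcs).map (fun p => (String.ofList p.1, String.ofList p.2))

-- ===== PORT B =====
-- _finish(action, inline, buf)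
def finishB (a inl : List Char) (buf : List (List Char)) : List Char × List Char :=
  (a, combineC inl (PySem.Chars.strip (PySem.Chars.join ['\n'] buf)))

-- the single 'for line in lines' loop with state (result, current, buf)
def loopB : List (List Char) →
    List (List Char × List Char) → Option (List Char × List Char) → List (List Char) →
    List (List Char × List Char) × Option (List Char × List Char) × List (List Char)
  | [], acc, cur, buf => (acc, cur, buf)
  | l :: rest, acc, cur, buf =>
    match matchAct VALID_ACTIONS (PySem.Chars.strip l) with
    | some m =>
      match cur with
      | some c => loopB rest (acc ++ [finishB c.1 c.2 buf]) (some m) []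
      | none => loopB rest acc (some m) []
    | none =>
      match cur with
      | some _ => loopB rest acc cur (buf ++ [l])
      | none => loopB rest acc cur buf

def parse_py_alt (response : String) : List (String × String) :=
  let lines := PySem.Chars.splitOn (PySem.Chars.strip response.toList) ['\n']
  match loopB lines [] none [] with
  | (_, none, _) => [("THINK", response)]
  | (acc, some c, buf) =>
    (acc ++ [finishB c.1 c.2 buf]).map (fun p => (String.ofList p.1, String.ofList p.2))

-- ===== PRECONDITION & SPEC =====
def Spec_parse_py (response : String) (out : List (String × String)) : Prop := out = parse_py_alt response
instance (response : String) (out : List (String × String)) : Decidable (Spec_parse_py response out) := by unfold Spec_parse_py; infer_instance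

-- ===== CLAIM (what is proved, stated in full; the proofs are below) =====
def Claim_equal_parse_py : Prop := ∀ (response : String), Dom_parse_py response → Spec_parse_py response (parse_py response)

-- ===== LEMMAS AND PROOFS =====

-- proof-side: position, match and remainder of the first matching line
def fsplit : List (List Char) → Option (Nat × (List Char × List Char) × List (List Char))
  | [] => none
  | l :: rest =>
    match matchAct VALID_ACTIONS (PySem.Chars.strip l) with
    | some c => some (0, c, rest)
    | none => (fsplit rest).map (fun p => (p.1 + 1, p.2))

-- proof-side: the tail of B's run after the first action is opened
def runR (c : List Char × List Char) (buf : List (List Char)) :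
    List (List Char) → List (List Char × List Char)
  | [] => [finishB c.1 c.2 buf]
  | l :: rest =>
    match matchAct VALID_ACTIONS (PySem.Chars.strip l) with
    | some m => finishB c.1 c.2 buf :: runR m [] rest
    | none => runR c (buf ++ [l]) rest

theorem fsplit_drop : ∀ {ls : List (List Char)} {d : Nat} {c rest},
    fsplit ls = some (d, c, rest) → ls.drop (d + 1) = rest := by
  intro ls
  induction ls with
  | nil => intro d c rest h; simp [fsplit] at h
  | cons l tl ih =>
    intro d c rest h
    simp only [fsplit] at h
    cases hm : matchAct VALID_ACTIONS (PySem.Chars.strip l) with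
    | some c0 =>
      rw [hm] at h
      simp only [Option.some.injEq, Prod.mk.injEq] at h
      obtain ⟨hd, hc, hr⟩ := h
      subst hd; subst hr; simp
    | none =>
      rw [hm] at h
      simp only [Option.map_eq_some_iff] at h
      obtain ⟨⟨d', c', r'⟩, hf, hx⟩ := h
      cases hx
      simpa using ih hf

theorem idxA_eq_fsplit (k : Int) (ls : List (List Char)) :
    idxA k ls = match fsplit ls with
      | none => []
      | some (d, c, rest) => (k + (d : Int), c.1, c.2) :: idxA (k + (d : Int) + 1) rest := by
  induction ls generalizing k with
  | nil => simp [idxA, fsplit]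
  | cons l tl ih =>
    cases hm : matchAct VALID_ACTIONS (PySem.Chars.strip l) with
    | some c0 =>
      obtain ⟨a, inl⟩ := c0
      simp [idxA, fsplit, hm]
    | none =>
      rw [show idxA k (l :: tl) = idxA (k + 1) tl from by simp [idxA, hm]]
      rw [ih (k + 1)]
      cases hf : fsplit tl with
      | none => simp [fsplit, hm, hf]
      | some p =>
        obtain ⟨d, c, rest⟩ := p
        simp only [fsplit, hm, hf, Option.map_some]
        have h1 : k + 1 + (d : Int) = k + ((d : Int) + 1) := by ring
        push_cast
        rw [h1]

theorem runR_eq (ls : List (List Char)) : ∀ c buf,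
    runR c buf ls = match fsplit ls with
      | none => [finishB c.1 c.2 (buf ++ ls)]
      | some (d, c', rest) => finishB c.1 c.2 (buf ++ ls.take d) :: runR c' [] rest := by
  induction ls with
  | nil => intro c buf; simp [runR, fsplit]
  | cons l tl ih =>
    intro c buf
    cases hm : matchAct VALID_ACTIONS (PySem.Chars.strip l) with
    | some m => simp [runR, fsplit, hm]
    | none =>
      rw [show runR c buf (l :: tl) = runR c (buf ++ [l]) tl from by simp [runR, hm]]
      rw [ih c (buf ++ [l])]
      cases hf : fsplit tl with
      | none => simp [fsplit, hm, hf]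
      | some p =>
        obtain ⟨d, c', rest⟩ := p
        simp [fsplit, hm, hf]

theorem loopB_none (ls : List (List Char)) : ∀ acc buf,
    loopB ls acc none buf = match fsplit ls with
      | none => (acc, none, buf)
      | some (_, c, rest) => loopB rest acc (some c) [] := by
  induction ls with
  | nil => intro acc buf; simp [loopB, fsplit]
  | cons l tl ih =>
    intro acc buf
    cases hm : matchAct VALID_ACTIONS (PySem.Chars.strip l) with
    | some m => simp [loopB, fsplit, hm]
    | none =>
      rw [show loopB (l :: tl) acc none buf = loopB tl acc none buf from by simp [loopB, hm]]
      rw [ih acc buf]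
      cases hf : fsplit tl with
      | none => simp [fsplit, hm, hf]
      | some p => obtain ⟨d, c, rest⟩ := p; simp [fsplit, hm, hf]

def flushS (st : List (List Char × List Char) × Option (List Char × List Char) × List (List Char)) :
    List (List Char × List Char) :=
  match st with
  | (acc, none, _) => acc
  | (acc, some c, buf) => acc ++ [finishB c.1 c.2 buf]

theorem loopB_some (ls : List (List Char)) : ∀ acc c buf,
    flushS (loopB ls acc (some c) buf) = acc ++ runR c buf ls ∧
      (loopB ls acc (some c) buf).2.1.isSome := by
  induction ls with
  | nil => intro acc c buf; simp [loopB, runR, flushS]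
  | cons l tl ih =>
    intro acc c buf
    cases hm : matchAct VALID_ACTIONS (PySem.Chars.strip l) with
    | some m =>
      rw [show loopB (l :: tl) acc (some c) buf
            = loopB tl (acc ++ [finishB c.1 c.2 buf]) (some m) [] from by simp [loopB, hm]]
      refine ⟨?_, (ih _ m []).2⟩
      rw [(ih _ m []).1]
      simp [runR, hm]
    | none =>
      rw [show loopB (l :: tl) acc (some c) buf = loopB tl acc (some c) (buf ++ [l]) from by
            simp [loopB, hm]]
      refine ⟨?_, (ih _ c _).2⟩
      rw [(ih _ c _).1]
      simp [runR, hm]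

theorem seg_none (full : List (List Char)) (k : Nat) (c : List Char × List Char)
    (tail : List (List Char)) (hdrop : full.drop (k + 1) = tail) (hf : fsplit tail = none) :
    segA full (((k : Int), c.1, c.2) :: idxA ((k : Int) + 1) tail) = runR c [] tail := by
  rw [idxA_eq_fsplit, runR_eq, hf]
  have hcast : ((k : Int) + 1) = ((k + 1 : Nat) : Int) := by push_cast; ring
  have hlen : tail.length = full.length - (k + 1) := by rw [← hdrop]; simp
  simp only [segA, hcast]
  rw [show ((full.length : Nat) : Int) = (((full.length : Nat) : Nat) : Int) from rfl]
  rw [PySem.List.slice_natCast full (k + 1) full.length]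
  rw [hdrop, ← hlen, List.take_length]
  simp [finishB]

theorem segA_eq (n : Nat) : ∀ (tail : List (List Char)), tail.length ≤ n →
    ∀ (full : List (List Char)) (k : Nat) (c : List Char × List Char),
    full.drop (k + 1) = tail →
    segA full (((k : Int), c.1, c.2) :: idxA ((k : Int) + 1) tail) = runR c [] tail := by
  induction n with
  | zero =>
    intro tail hlen full k c hdrop
    have ht : tail = [] := List.eq_nil_of_length_eq_zero (Nat.le_zero.mp hlen)
    exact seg_none full k c tail hdrop (by rw [ht]; rfl)
  | succ n ih =>
    intro tail hlen full k c hdrop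
    cases hf : fsplit tail with
    | none => exact seg_none full k c tail hdrop hf
    | some p =>
      obtain ⟨d, c', rest⟩ := p
      have h1 : tail ≠ [] := by intro h; rw [h] at hf; simp [fsplit] at hf
      have hrest : tail.drop (d + 1) = rest := fsplit_drop hf
      have hrlen : rest.length ≤ n := by
        have := congrArg List.length hrest
        simp at this
        have h2 : 1 ≤ tail.length := Nat.one_le_iff_ne_zero.mpr (by
          intro h; exact h1 (List.eq_nil_of_length_eq_zero h))
        omega
      rw [idxA_eq_fsplit, runR_eq, hf]
      have hcast : ((k : Int) + 1) = ((k + 1 : Nat) : Int) := by push_cast; ring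
      simp only [segA, hcast]
      rw [PySem.List.slice_natCast_add full (k + 1) d]
      rw [hdrop]
      have hdr2 : full.drop (k + 1 + d + 1) = rest := by
        rw [show k + 1 + d + 1 = (k + 1) + (d + 1) from by omega, ← List.drop_drop, hdrop, hrest]
      have hIH := ih rest hrlen full (k + 1 + d) c' hdr2
      have hcast2 : ((k + 1 : Nat) : Int) + (d : Int) = ((k + 1 + d : Nat) : Int) := by push_cast; ring
      simp only [segA] at hIH
      rw [hcast2]
      exact congrArg₂ (· :: ·) (by simp [finishB]) hIH

-- ===== VERDICT (by name: the statement is the Claim_ definition above) =====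
theorem parse_py_spec : Claim_equal_parse_py := by
  intro response _
  unfold Spec_parse_py parse_py parse_py_alt
  simp only []
  set lines := PySem.Chars.splitOn (PySem.Chars.strip response.toList) ['\n'] with hlines
  rw [loopB_none, idxA_eq_fsplit]
  cases hf : fsplit lines with
  | none => simp
  | some p =>
    obtain ⟨d, c, rest⟩ := p
    simp only [zero_add, reduceCtorEq]
    have hA := segA_eq rest.length rest le_rfl lines d c (fsplit_drop hf)
    rw [hA]
    rcases hst : loopB rest [] (some c) [] with ⟨acc, cur, buf⟩
    have hB := loopB_some rest [] c []
    rw [hst] at hB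
    cases cur with
    | none => simp [flushS] at hB
    | some c2 =>
      simp only []
      have : acc ++ [finishB c2.1 c2.2 buf] = runR c [] rest := by
        simpa [flushS] using hB.1
      rw [this]
      simp
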